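-- pv_equiv track=rewrite | github.com/0417taehyun/Algorithm | LeetCode/Python/1_Easy/1796.py | solution
-- ===== SOURCE A (Python) =====
-- def solution(s: str) -> int:
--     maximum_number, answer = -1, -1
--     for character in s:
--         if character.isdigit():
--             number: int = int(character)
--             if number > maximum_number:
--                 maximum_number, answer = number, maximum_number
--             elif number < maximum_number and number > answer:
--                 answer = number
--
--     return answer
-- ===== SOURCE B (Python) =====
-- def solution(s: str) -> int:
--     digits = sorted({int(c) for c in s if c.isdigit()})
--     return digits[-2] if len(digits) >= 2 else -1
-- ===== Notes on version B (the rewrite author's own statement) =====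
-- stated objective: simpler
-- what changed: Replaces the single-pass max/second-max state machine with collecting the set of distinct digit values and sorting it, returning the second-to-last element (or -1 if fewer than two distinct digits).
import Mathlib
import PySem

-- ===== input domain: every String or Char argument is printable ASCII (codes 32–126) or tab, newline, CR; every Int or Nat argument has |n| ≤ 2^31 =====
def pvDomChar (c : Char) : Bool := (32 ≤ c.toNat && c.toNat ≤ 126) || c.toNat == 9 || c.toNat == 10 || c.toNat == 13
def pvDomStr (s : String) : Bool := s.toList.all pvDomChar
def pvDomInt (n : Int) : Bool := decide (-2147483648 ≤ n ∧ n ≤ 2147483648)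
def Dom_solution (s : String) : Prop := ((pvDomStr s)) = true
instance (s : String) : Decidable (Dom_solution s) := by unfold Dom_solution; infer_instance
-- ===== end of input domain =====

-- B replaces A's single-pass max/second-max state machine by sorting the set of
-- distinct digit values and taking the second-to-last element (objective: simpler).

-- ===== PORT A =====
-- one step of A's loop; int(character) on a single ASCII digit is c.toNat - 48 (exact on Dom)
def solutionStep (st : Int × Int) (c : Char) : Int × Int :=
  if PySem.Chars.isdigit c then
    let number : Int := (c.toNat : Int) - 48
    if number > st.1 then (number, st.1)
    else if number < st.1 ∧ number > st.2 then (st.1, number)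
    else st
  else st

def solution (s : String) : Int :=
  (s.toList.foldl solutionStep (-1, -1)).2

-- ===== PORT B =====
-- the set comprehension {int(c) for c in s if c.isdigit()}
def digitSet (s : String) : PySem.Set Int :=
  PySem.Set.ofList (s.toList.filterMap
    (fun c => if PySem.Chars.isdigit c then some ((c.toNat : Int) - 48) else none))

def solution_alt (s : String) : Int :=
  let digits := PySem.List.sorted (digitSet s) (fun x => x) false
  if 2 ≤ digits.length then (PySem.List.pyGet? digits (-2)).getD 0 else -1

-- ===== PRECONDITION & SPEC =====
def Spec_solution (s : String) (out : Int) : Prop := out = solution_alt s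
instance (s : String) (out : Int) : Decidable (Spec_solution s out) := by unfold Spec_solution; infer_instance

-- ===== CLAIM (what is proved, stated in full; the proofs are below) =====
def Claim_equal_solution : Prop := ∀ (s : String), Dom_solution s → Spec_solution s (solution s)

-- ===== LEMMAS AND PROOFS =====

-- the digit values of a char list, in order
def digitsOf (l : List Char) : List Int :=
  l.filterMap (fun c => if PySem.Chars.isdigit c then some ((c.toNat : Int) - 48) else none)

-- A's result as two max-folds over the digit list
def maxD (l : List Char) : Int := (digitsOf l).foldl max (-1)
def sndD (l : List Char) : Int := ((digitsOf l).filter (fun x => x < maxD l)).foldl max (-1)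

theorem digitsOf_nonneg (l : List Char) : ∀ x ∈ digitsOf l, 0 ≤ x := by
  intro x hx
  simp only [digitsOf, List.mem_filterMap] at hx
  obtain ⟨c, _, hc⟩ := hx
  by_cases h : PySem.Chars.isdigit c
  · simp [h] at hc
    have : '0' ≤ c := by
      simp [PySem.Chars.isdigit] at h; exact h.1
    have : (48 : Nat) ≤ c.toNat := this
    omega
  · simp [h] at hc

theorem foldl_max_init_le (l : List Int) (a : Int) : a ≤ l.foldl max a := by
  induction l generalizing a with
  | nil => simp
  | cons x xs ih => exact le_trans (le_max_left a x) (ih (max a x))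

theorem foldl_max_mem_le (l : List Int) (a : Int) : ∀ x ∈ l, x ≤ l.foldl max a := by
  induction l generalizing a with
  | nil => simp
  | cons y ys ih =>
    intro x hx
    rcases List.mem_cons.mp hx with h | h
    · subst h; exact le_trans (le_max_right a x) (foldl_max_init_le ys _)
    · exact ih _ x h

theorem foldl_max_cases (l : List Int) (a : Int) :
    l.foldl max a = a ∨ l.foldl max a ∈ l := by
  induction l generalizing a with
  | nil => simp
  | cons y ys ih =>
    simp only [List.foldl_cons]
    rcases ih (max a y) with h | h
    · by_cases hy : y ≤ a
      · left; rw [h, max_eq_left hy]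
      · right; rw [h, max_eq_right (not_le.mp hy).le]; exact List.mem_cons_self
    · right; exact List.mem_cons_of_mem _ h

theorem foldl_max_append (l : List Int) (a n : Int) :
    (l ++ [n]).foldl max a = max (l.foldl max a) n := by
  simp [List.foldl_append]

theorem digitsOf_append (l : List Char) (c : Char) :
    digitsOf (l ++ [c]) =
      digitsOf l ++ (if PySem.Chars.isdigit c then [((c.toNat : Int) - 48)] else []) := by
  simp only [digitsOf, List.filterMap_append]
  split_ifs with h <;> simp [h]

-- the loop invariant: A's fold computes (maxD, sndD)
theorem foldl_step_eq (l : List Char) :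
    l.foldl solutionStep (-1, -1) = (maxD l, sndD l) := by
  induction l using List.reverseRecOn with
  | nil => simp [maxD, sndD, digitsOf]
  | append_singleton l c ih =>
    rw [List.foldl_append, ih, List.foldl_cons, List.foldl_nil]
    by_cases hc : PySem.Chars.isdigit c
    · have hd : digitsOf (l ++ [c]) = digitsOf l ++ [((c.toNat : Int) - 48)] := by
        rw [digitsOf_append]; simp [hc]
      simp only [solutionStep, hc, if_true]
      generalize hgen : ((c.toNat : Int) - 48) = n at hd ⊢
      have hmax : maxD (l ++ [c]) = max (maxD l) n := by
        simp [maxD, hd]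
      split_ifs with h1 h2
      · -- new maximum: every old digit is < n, so the old filter keeps everything
        have hall : ∀ x ∈ digitsOf l, x < n :=
          fun x hx => lt_of_le_of_lt (foldl_max_mem_le _ _ x hx) h1
        have hm' : maxD (l ++ [c]) = n := by rw [hmax]; omega
        have hfilter : (digitsOf (l ++ [c])).filter (fun x => x < maxD (l ++ [c])) = digitsOf l := by
          rw [hd, hm', List.filter_append]
          have h0 : (digitsOf l).filter (fun x => x < n) = digitsOf l :=
            List.filter_eq_self.mpr (fun x hx => by simpa using hall x hx)
          simp [h0]
        have hs' : sndD (l ++ [c]) = maxD l := by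
          unfold sndD; rw [hfilter]; rfl
        rw [hm', hs']
      · -- below the maximum: filter gains n, new second-max is max(old, n) = n
        have hm' : maxD (l ++ [c]) = maxD l := by rw [hmax]; omega
        have hfilter : (digitsOf (l ++ [c])).filter (fun x => x < maxD (l ++ [c])) =
            (digitsOf l).filter (fun x => x < maxD l) ++ [n] := by
          rw [hd, hm', List.filter_append]; simp [h2.1]
        have hs' : sndD (l ++ [c]) = max (sndD l) n := by
          unfold sndD; rw [hfilter, foldl_max_append]
        rw [hm', hs']
        have : max (sndD l) n = n := by have := h2.2; omega
        rw [this]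
      · -- no change: either n = maxD l, or n ≤ sndD l < maxD l
        have hm' : maxD (l ++ [c]) = maxD l := by rw [hmax]; omega
        have hs' : sndD (l ++ [c]) = sndD l := by
          by_cases he : n < maxD l
          · have hle : n ≤ sndD l := by
              rcases not_and_or.mp h2 with h | h
              · omega
              · omega
            have hfilter : (digitsOf (l ++ [c])).filter (fun x => x < maxD (l ++ [c])) =
                (digitsOf l).filter (fun x => x < maxD l) ++ [n] := by
              rw [hd, hm', List.filter_append]; simp [he]
            unfold sndD; rw [hfilter, foldl_max_append]
            exact max_eq_left hle
          · have he' : n = maxD l := by omega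
            have hfilter : (digitsOf (l ++ [c])).filter (fun x => x < maxD (l ++ [c])) =
                (digitsOf l).filter (fun x => x < maxD l) := by
              rw [hd, hm', List.filter_append]; simp [he']
            unfold sndD; rw [hfilter]
        rw [hm', hs']
    · have hd : digitsOf (l ++ [c]) = digitsOf l := by rw [digitsOf_append]; simp [hc]
      have hm' : maxD (l ++ [c]) = maxD l := by unfold maxD; rw [hd]
      have hs' : sndD (l ++ [c]) = sndD l := by unfold sndD; rw [hd, hm']
      simp only [solutionStep, hc, Bool.false_eq_true, if_false, hm', hs']

theorem solution_eq_sndD (s : String) : solution s = sndD s.toList := by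
  simp [solution, foldl_step_eq]

-- === B-side characterisation ===

theorem mem_sortedSet (s : String) (x : Int) :
    x ∈ PySem.List.sorted (digitSet s) (fun x => x) false ↔ x ∈ digitsOf s.toList := by
  rw [PySem.List.mem_sorted]
  exact PySem.Set.mem_ofList _ _

theorem sorted_chain (s : String) :
    (PySem.List.sorted (digitSet s) (fun x => x) false).Pairwise (· < ·) :=
  PySem.List.sorted_ofList_pairwise_lt _

-- strictly increasing indexed access
theorem pairwise_lt_get {ds : List Int} (h : ds.Pairwise (· < ·))
    {i j : Nat} (hij : i < j) (hj : j < ds.length) : ds[i]'(by omega) < ds[j]'hj := by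
  exact List.pairwise_iff_getElem.mp h i j (by omega) hj hij

theorem solution_spec_aux (s : String) : solution s = solution_alt s := by
  rw [solution_eq_sndD]
  set ds := PySem.List.sorted (digitSet s) (fun x => x) false with hds
  have hchain := sorted_chain s
  have hmem : ∀ x : Int, x ∈ ds ↔ x ∈ digitsOf s.toList := mem_sortedSet s
  by_cases hlen : 2 ≤ ds.length
  · -- at least two distinct digits
    have h1 : ds.length - 1 < ds.length := by omega
    have h2 : ds.length - 2 < ds.length := by omega
    set L := ds[ds.length - 1]'h1 with hL
    set S := ds[ds.length - 2]'h2 with hS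
    have hSL : S < L := pairwise_lt_get hchain (by omega) h1
    have hLmem : L ∈ digitsOf s.toList := (hmem L).mp (List.getElem_mem _)
    have hSmem : S ∈ digitsOf s.toList := (hmem S).mp (List.getElem_mem _)
    -- maxD = L
    have hLmax : maxD s.toList = L := by
      have hle : L ≤ maxD s.toList := foldl_max_mem_le _ _ L hLmem
      have hge : maxD s.toList ≤ L := by
        rcases foldl_max_cases (digitsOf s.toList) (-1) with h | h
        · have := digitsOf_nonneg s.toList L hLmem
          unfold maxD; omega
        · have hmds : maxD s.toList ∈ ds := (hmem _).mpr h
          obtain ⟨i, hi, hieq⟩ := List.getElem_of_mem hmds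
          rcases Nat.lt_or_ge i (ds.length - 1) with hlt | hge'
          · have := pairwise_lt_get hchain hlt h1
            rw [hieq] at this; exact le_of_lt this
          · have : i = ds.length - 1 := by omega
            subst this; rw [← hieq]
      omega
    -- sndD = S
    have hSs : sndD s.toList = S := by
      have hSfilt : S ∈ (digitsOf s.toList).filter (fun x => x < maxD s.toList) := by
        apply List.mem_filter.mpr
        exact ⟨hSmem, by simp [hLmax]; exact hSL⟩
      have hle : S ≤ sndD s.toList := foldl_max_mem_le _ _ S hSfilt
      have hge : sndD s.toList ≤ S := by
        rcases foldl_max_cases ((digitsOf s.toList).filter (fun x => x < maxD s.toList)) (-1) with h | h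
        · have := digitsOf_nonneg s.toList S hSmem
          unfold sndD; omega
        · have hmem' := List.mem_filter.mp h
          have hsd : sndD s.toList ∈ ds := (hmem _).mpr hmem'.1
          have hslt : sndD s.toList < L := by
            have h2' : sndD s.toList < maxD s.toList := by
              have := hmem'.2
              simp only [decide_eq_true_eq] at this
              exact this
            rw [hLmax] at h2'
            exact h2'
          obtain ⟨i, hi, hieq⟩ := List.getElem_of_mem hsd
          have hine : i ≠ ds.length - 1 := by
            intro he; subst he
            rw [← hieq, ← hL] at hslt
            exact lt_irrefl _ hslt
          have hile : i ≤ ds.length - 2 := by omega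
          rcases Nat.lt_or_ge i (ds.length - 2) with hlt | hge'
          · have := pairwise_lt_get hchain hlt h2
            rw [hieq] at this; exact le_of_lt this
          · have : i = ds.length - 2 := by omega
            subst this; rw [← hieq]
      omega
    -- B returns ds[-2] = S
    have hB : solution_alt s = S := by
      unfold solution_alt
      rw [← hds]
      simp only [hlen, if_pos]
      have hget : PySem.List.pyGet? ds (-2) = some S := by
        unfold PySem.List.pyGet? PySem.List.pyIdx?
        rw [if_neg (show ¬ (0 ≤ (-2 : Int)) by omega),
           if_pos (show -(ds.length : Int) ≤ -2 by omega)]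
        have h2n : ds.length - ((-(-2 : Int)).toNat) = ds.length - 2 := by rfl
        rw [h2n]
        show ds[ds.length - 2]? = some S
        rw [List.getElem?_eq_getElem h2, hS]
      simp [hget]
    rw [hB, hSs]
  · -- fewer than two distinct digits: both sides are -1
    have hB : solution_alt s = -1 := by
      unfold solution_alt; rw [← hds]; simp [hlen]
    rw [hB]
    match hdse : ds with
    | [] =>
      have hde : digitsOf s.toList = [] := by
        apply List.eq_nil_iff_forall_not_mem.mpr
        intro x hx
        have := (hmem x).mpr hx
        simp at this
      simp [sndD, hde]
    | [v] =>
      have hvd : v ∈ digitsOf s.toList := (hmem v).mp (by simp)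
      have hall : ∀ x ∈ digitsOf s.toList, x = v := by
        intro x hx
        have := (hmem x).mpr hx
        simpa using this
      have hv0 : (0 : Int) ≤ v := digitsOf_nonneg s.toList v hvd
      have hmaxv : maxD s.toList = v := by
        have hle : v ≤ maxD s.toList := foldl_max_mem_le _ _ v hvd
        rcases foldl_max_cases (digitsOf s.toList) (-1) with h | h
        · unfold maxD; unfold maxD at hle; omega
        · exact hall _ h
      have hfilter : (digitsOf s.toList).filter (fun x => x < maxD s.toList) = [] := by
        apply List.filter_eq_nil_iff.mpr
        intro x hx
        have := hall x hx
        simp [this, hmaxv]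
      simp [sndD, hfilter]
    | v :: w :: t =>
      simp [List.length_cons] at hlen

-- ===== VERDICT (by name: the statement is the Claim_ definition above) =====
theorem solution_spec : Claim_equal_solution := by
  intro s _
  unfold Spec_solution
  exact solution_spec_aux s
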